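-- pv_equiv track=rewrite | github.com/h-spear/problem-solving-python | programmers/level2/more_spicy.py | solution
-- ===== SOURCE A (Python) =====
-- import heapq
--
-- def solution(scoville, K):
--     heap = []
--     for x in scoville:
--         heapq.heappush(heap, x)
--     answer = 0
--     while heap[0] < K:
--         if len(heap) == 1:
--             return -1
--         one = heapq.heappop(heap)
--         two = heapq.heappop(heap)
--         heapq.heappush(heap, one + two * 2)
--         answer += 1
--
--     return answer
-- ===== SOURCE B (Python) =====
-- def solution(scoville, K):
--     pool = list(scoville)
--     answer = 0
--     while True:
--         m = min(pool)
--         if m >= K: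
--             return answer
--         if len(pool) == 1:
--             return -1
--         pool.remove(m)
--         m2 = min(pool)
--         pool.remove(m2)
--         pool.append(m + m2 * 2)
--         answer += 1
-- ===== Notes on version B (the rewrite author's own statement) =====
-- stated objective: alternative
-- what changed: Replaces the binary heap entirely by repeated selection over an unordered pool: each round finds the minimum by a linear min() scan, removes the two smallest with list.remove, and appends the mix at the end, so no ordering invariant (heap or sorted list) is ever maintained.
import Mathlib
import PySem

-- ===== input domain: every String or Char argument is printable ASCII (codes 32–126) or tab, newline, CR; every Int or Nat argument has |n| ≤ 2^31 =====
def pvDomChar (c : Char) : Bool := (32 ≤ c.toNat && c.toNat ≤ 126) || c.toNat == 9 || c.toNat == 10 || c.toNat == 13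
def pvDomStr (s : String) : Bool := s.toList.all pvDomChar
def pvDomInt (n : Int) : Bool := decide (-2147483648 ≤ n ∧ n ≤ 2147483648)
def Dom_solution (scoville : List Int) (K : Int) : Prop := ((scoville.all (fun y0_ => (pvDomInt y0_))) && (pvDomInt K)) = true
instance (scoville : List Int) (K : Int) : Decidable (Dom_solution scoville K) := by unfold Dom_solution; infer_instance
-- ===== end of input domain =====

-- B abandons any ordered container: it repeatedly finds the minimum of an unordered pool by
-- a linear min scan, removes the two smallest and appends the mix — repeated selection
-- instead of a heap; alternative (not faster).


-- ===== PORT A =====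
-- `heapq` has no PySem primitive; it is modeled by a verified binary min-heap (a skew heap,
-- with a fuel argument that only makes the recursion structural and is always sufficient).
-- This is exact for the observable behaviour: the heap list itself is never part of the
-- result, and ints compare by value, so every min-heap pops the same sequence of values.
inductive PHeap : Type
  | nil : PHeap
  | node : Int → PHeap → PHeap → PHeap

def PHeap.size : PHeap → Nat
  | .nil => 0
  | .node _ a b => a.size + b.size + 1

def PHeap.mergeF : Nat → PHeap → PHeap → PHeap
  | _, .nil, h => h
  | _, h, .nil => h
  | 0, h, _ => h            -- fuel exhausted: never reached with fuel ≥ total size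
  | n + 1, .node x a b, .node y c d =>
    if x ≤ y then .node x (PHeap.mergeF n b (.node y c d)) a
    else .node y (PHeap.mergeF n d (.node x a b)) c

def PHeap.merge (h1 h2 : PHeap) : PHeap := PHeap.mergeF (h1.size + h2.size) h1 h2

-- heapq.heappush(heap, x)
def PHeap.heappush (h : PHeap) (x : Int) : PHeap := PHeap.merge (.node x .nil .nil) h

-- the `while heap[0] < K` loop of A (heapq.heappop twice, heappush the mix, answer += 1);
-- the fuel (= heap size, which strictly decreases per iteration) makes it structural
def loopA (K : Int) : Nat → PHeap → Int → Int
  | _, .nil, ans => ans     -- unreachable under Pre_ (Python raises IndexError on heap[0])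
  | 0, _, ans => ans        -- fuel exhausted: never reached with fuel ≥ heap size
  | n + 1, .node x a b, ans =>
    if x < K then
      if (PHeap.node x a b).size = 1 then -1
      else
        match PHeap.merge a b with
        | .nil => ans       -- unreachable: the heap has ≥ 2 elements here
        | .node y c d => loopA K n (PHeap.heappush (PHeap.merge c d) (x + y * 2)) (ans + 1)
    else ans

def solution (scoville : List Int) (K : Int) : Int :=
  let heap := scoville.foldl (fun h x => PHeap.heappush h x) PHeap.nil
  loopA K heap.size heap 0

-- ===== PORT B =====
-- the `while True` loop of B: min(pool) is a linear scan (PySem.List.min?, first extremal),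
-- pool.remove(m) removes the first occurrence (PySem.List.remove?), the mix is appended;
-- the fuel (= pool length, which strictly decreases per iteration) makes it structural
def loopB (K : Int) : Nat → List Int → Int → Int
  | 0, _, ans => ans        -- fuel exhausted: never reached with fuel ≥ pool length
  | n + 1, pool, ans =>
    match PySem.List.min? pool (fun x => x) with
    | none => ans           -- min([]) raises ValueError; unreachable under Pre_
    | some m =>
      if K ≤ m then ans
      else if pool.length = 1 then -1
      else
        match PySem.List.remove? pool m with
        | none => ans       -- unreachable: m ∈ pool
        | some pool1 =>
          match PySem.List.min? pool1 (fun x => x) with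
          | none => ans     -- unreachable: pool1 has ≥ 1 element here
          | some m2 =>
            match PySem.List.remove? pool1 m2 with
            | none => ans   -- unreachable: m2 ∈ pool1
            | some pool2 => loopB K n (pool2 ++ [m + m2 * 2]) (ans + 1)

def solution_alt (scoville : List Int) (K : Int) : Int :=
  loopB K scoville.length scoville 0

-- ===== PRECONDITION & SPEC =====
-- Pre_ excludes only the empty list, on which the Python A raises IndexError at heap[0].
def Pre_solution (scoville : List Int) (K : Int) : Prop := scoville ≠ []
instance (scoville : List Int) (K : Int) : Decidable (Pre_solution scoville K) := by unfold Pre_solution; infer_instance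
def pvWitness_solution : List Int × Int := ([1, 2, 3, 9, 10, 12], 7)

def Spec_solution (scoville : List Int) (K : Int) (out : Int) : Prop := out = solution_alt scoville K
instance (scoville : List Int) (K : Int) (out : Int) : Decidable (Spec_solution scoville K out) := by unfold Spec_solution; infer_instance

-- ===== CLAIM (what is proved, stated in full; the proofs are below) =====
def Claim_equal_solution : Prop := ∀ (scoville : List Int) (K : Int), Dom_solution scoville K → Pre_solution scoville K → Spec_solution scoville K (solution scoville K)

-- ===== LEMMAS AND PROOFS =====

def toMS : PHeap → Multiset Int
  | .nil => 0
  | .node x a b => {x} + toMS a + toMS b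

def IsHeap : PHeap → Prop
  | .nil => True
  | .node x a b => (∀ y ∈ toMS a + toMS b, x ≤ y) ∧ IsHeap a ∧ IsHeap b

theorem mem_toMS_node (z x : Int) (a b : PHeap) :
    z ∈ toMS (PHeap.node x a b) ↔ z = x ∨ z ∈ toMS a ∨ z ∈ toMS b := by
  simp [toMS]

theorem toMS_mergeF (n : Nat) (a b : PHeap) (hn : a.size + b.size ≤ n) :
    toMS (PHeap.mergeF n a b) = toMS a + toMS b := by
  induction n generalizing a b with
  | zero =>
    cases a with
    | nil => simp [PHeap.mergeF, toMS]
    | node x a1 a2 =>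
      cases b with
      | nil => simp [PHeap.mergeF, toMS]
      | node y b1 b2 => simp [PHeap.size] at hn
  | succ n ih =>
    cases a with
    | nil => simp [PHeap.mergeF, toMS]
    | node x a1 a2 =>
      cases b with
      | nil => simp [PHeap.mergeF, toMS]
      | node y b1 b2 =>
        simp only [PHeap.size] at hn
        rw [PHeap.mergeF]
        split_ifs with h
        · rw [toMS, toMS, ih a2 (PHeap.node y b1 b2) (by simp [PHeap.size]; omega)]
          simp only [toMS]
          abel
        · rw [toMS, toMS, ih b2 (PHeap.node x a1 a2) (by simp [PHeap.size]; omega)]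
          simp only [toMS]
          abel

theorem toMS_merge (a b : PHeap) : toMS (PHeap.merge a b) = toMS a + toMS b :=
  toMS_mergeF _ a b (Nat.le_refl _)

theorem card_toMS (h : PHeap) : (toMS h).card = h.size := by
  induction h with
  | nil => simp [toMS, PHeap.size]
  | node x a b iha ihb => simp [toMS, PHeap.size, iha, ihb]

theorem size_merge (a b : PHeap) : (PHeap.merge a b).size = a.size + b.size := by
  rw [← card_toMS, toMS_merge, Multiset.card_add, card_toMS, card_toMS]

theorem isHeap_mergeF (n : Nat) (a b : PHeap) (hn : a.size + b.size ≤ n)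
    (ha : IsHeap a) (hb : IsHeap b) : IsHeap (PHeap.mergeF n a b) := by
  induction n generalizing a b with
  | zero =>
    cases a with
    | nil => simpa [PHeap.mergeF] using hb
    | node x a1 a2 =>
      cases b with
      | nil => simpa [PHeap.mergeF] using ha
      | node y b1 b2 => simp [PHeap.size] at hn
  | succ n ih =>
    cases a with
    | nil => simpa [PHeap.mergeF] using hb
    | node x a1 a2 =>
      cases b with
      | nil => simpa [PHeap.mergeF] using ha
      | node y b1 b2 =>
        simp only [PHeap.size] at hn
        simp only [IsHeap] at ha hb
        obtain ⟨hxa, ha1, ha2⟩ := ha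
        obtain ⟨hyb, hb1, hb2⟩ := hb
        rw [PHeap.mergeF]
        split_ifs with h
        · simp only [IsHeap]
          refine ⟨?_, ih a2 (PHeap.node y b1 b2) (by simp [PHeap.size]; omega)
            ha2 (by exact ⟨hyb, hb1, hb2⟩), ha1⟩
          intro z hz
          rw [Multiset.mem_add, toMS_mergeF _ _ _ (by simp [PHeap.size]; omega),
            Multiset.mem_add] at hz
          rcases hz with (hz | hz) | hz
          · exact hxa z (Multiset.mem_add.mpr (Or.inr hz))
          · rcases (mem_toMS_node z y b1 b2).mp hz with rfl | hz | hz
            · exact h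
            · exact le_trans h (hyb z (Multiset.mem_add.mpr (Or.inl hz)))
            · exact le_trans h (hyb z (Multiset.mem_add.mpr (Or.inr hz)))
          · exact hxa z (Multiset.mem_add.mpr (Or.inl hz))
        · have hyx : y ≤ x := by omega
          simp only [IsHeap]
          refine ⟨?_, ih b2 (PHeap.node x a1 a2) (by simp [PHeap.size]; omega)
            hb2 (by exact ⟨hxa, ha1, ha2⟩), hb1⟩
          intro z hz
          rw [Multiset.mem_add, toMS_mergeF _ _ _ (by simp [PHeap.size]; omega),
            Multiset.mem_add] at hz
          rcases hz with (hz | hz) | hz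
          · exact hyb z (Multiset.mem_add.mpr (Or.inr hz))
          · rcases (mem_toMS_node z x a1 a2).mp hz with rfl | hz | hz
            · exact hyx
            · exact le_trans hyx (hxa z (Multiset.mem_add.mpr (Or.inl hz)))
            · exact le_trans hyx (hxa z (Multiset.mem_add.mpr (Or.inr hz)))
          · exact hyb z (Multiset.mem_add.mpr (Or.inl hz))

theorem isHeap_merge (a b : PHeap) (ha : IsHeap a) (hb : IsHeap b) :
    IsHeap (PHeap.merge a b) :=
  isHeap_mergeF _ a b (Nat.le_refl _) ha hb

theorem root_le (x : Int) (a b : PHeap) (h : IsHeap (PHeap.node x a b)) :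
    ∀ y ∈ toMS (PHeap.node x a b), x ≤ y := by
  simp only [IsHeap] at h
  intro y hy
  rcases (mem_toMS_node y x a b).mp hy with rfl | hy | hy
  · exact le_refl y
  · exact h.1 y (Multiset.mem_add.mpr (Or.inl hy))
  · exact h.1 y (Multiset.mem_add.mpr (Or.inr hy))

-- the linear min scan of B finds exactly the root value of any heap over the same multiset
theorem min?_eq_root (x : Int) (a b : PHeap) (pool : List Int)
    (hh : IsHeap (PHeap.node x a b))
    (hm : (pool : Multiset Int) = toMS (PHeap.node x a b)) :
    PySem.List.min? pool (fun y => y) = some x := by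
  have hne : pool ≠ [] := by
    intro h0
    have := congrArg Multiset.card hm
    simp [h0, toMS] at this
  obtain ⟨m, hm?⟩ := Option.ne_none_iff_exists'.mp
    (fun h0 => hne ((PySem.List.min?_eq_none_iff pool (fun y => y)).mp h0))
  have hmem : m ∈ pool := PySem.List.min?_mem hm?
  have hx_mem : x ∈ pool := by
    rw [← Multiset.mem_coe, hm]; simp [toMS]
  have h1 : x ≤ m := root_le x a b hh m (by rw [← hm]; exact Multiset.mem_coe.mpr hmem)
  have h2 : m ≤ x := PySem.List.min?_isMin hm? x hx_mem
  rw [hm?]; congr 1; omega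

theorem loop_eq (K : Int) (n : Nat) (m : Nat) (h : PHeap) (pool : List Int) (ans : Int)
    (hn : h.size ≤ n) (hlm : pool.length ≤ m) (hh : IsHeap h)
    (hm : (pool : Multiset Int) = toMS h) :
    loopA K n h ans = loopB K m pool ans := by
  induction n generalizing m h pool ans with
  | zero =>
    cases h with
    | nil =>
      have hl : pool = [] := by
        have := congrArg Multiset.card hm
        simpa [toMS] using this
      subst hl
      cases m <;> simp [loopA, loopB, PySem.List.min?]
    | node x a b => simp [PHeap.size] at hn
  | succ n ih =>
    cases h with
    | nil =>
      have hl : pool = [] := by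
        have := congrArg Multiset.card hm
        simpa [toMS] using this
      subst hl
      cases m <;> simp [loopA, loopB, PySem.List.min?]
    | node x a b =>
      cases m with
      | zero =>
        have hc : pool.length = (PHeap.node x a b).size := by
          have := congrArg Multiset.card hm
          simpa [card_toMS] using this
        simp [PHeap.size] at hc
        omega
      | succ m =>
        rw [loopA, loopB, min?_eq_root x a b pool hh hm]
        by_cases hK : x < K
        · simp only [if_pos hK, if_neg (by omega : ¬ K ≤ x)]
          have hcard : pool.length = (PHeap.node x a b).size := by
            have := congrArg Multiset.card hm
            simpa [card_toMS] using this
          by_cases hone : (PHeap.node x a b).size = 1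
          · rw [if_pos hone, if_pos (by omega)]
          · rw [if_neg hone, if_neg (by omega)]
            have hx_mem : x ∈ pool := by
              rw [← Multiset.mem_coe, hm]; simp [toMS]
            rw [PySem.List.remove?_eq_some_erase pool x hx_mem]
            have htail : ((pool.erase x : List Int) : Multiset Int) = toMS (PHeap.merge a b) := by
              rw [← Multiset.coe_erase, hm, toMS_merge]
              simp only [toMS]
              rw [show ({x} : Multiset Int) + toMS a + toMS b = x ::ₘ (toMS a + toMS b) by
                simp [Multiset.singleton_add]]
              exact Multiset.erase_cons_head x _
            cases hmab : PHeap.merge a b with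
            | nil =>
              have hsz := size_merge a b
              rw [hmab] at hsz
              simp [PHeap.size] at hsz
              simp [PHeap.size] at hone
              omega
            | node y c d =>
              dsimp only
              have hh' := hh
              simp only [IsHeap] at hh'
              have hh1 : IsHeap (PHeap.node y c d) := by
                rw [← hmab]; exact isHeap_merge a b hh'.2.1 hh'.2.2
              rw [hmab] at htail
              rw [min?_eq_root y c d _ hh1 htail]
              dsimp only
              have hy_mem : y ∈ pool.erase x := by
                rw [← Multiset.mem_coe, htail]; simp [toMS]
              rw [PySem.List.remove?_eq_some_erase _ y hy_mem]
              dsimp only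
              apply ih
              · -- fuel for A: the new heap is one element smaller
                have e1 : (PHeap.heappush (PHeap.merge c d) (x + y * 2)).size
                    = c.size + d.size + 1 := by
                  rw [PHeap.heappush, size_merge, size_merge]
                  simp only [PHeap.size]
                  omega
                have e2 : (PHeap.node y c d).size = (pool.erase x).length := by
                  have := congrArg Multiset.card htail
                  simpa [card_toMS] using this.symm
                have e3 : (pool.erase x).length + 1 = pool.length :=
                  List.length_erase_add_one hx_mem
                rw [e1]
                simp only [PHeap.size] at hn hone hcard e2
                omega
              · -- fuel for B: the new pool is one element smaller
                have e3 : (pool.erase x).length + 1 = pool.length :=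
                  List.length_erase_add_one hx_mem
                have e4 : ((pool.erase x).erase y).length + 1 = (pool.erase x).length :=
                  List.length_erase_add_one hy_mem
                simp only [List.length_append, List.length_singleton]
                omega
              · -- heap invariant of the new heap
                have hh1' := hh1
                simp only [IsHeap] at hh1'
                exact isHeap_merge _ _ (by simp [IsHeap, toMS])
                  (isHeap_merge c d hh1'.2.1 hh1'.2.2)
              · -- multisets of the new pool and new heap agree
                rw [PHeap.heappush, toMS_merge, toMS_merge]
                have h5 : (((pool.erase x).erase y : List Int) : Multiset Int)
                    = toMS c + toMS d := by
                  rw [← Multiset.coe_erase, htail]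
                  rw [show toMS (PHeap.node y c d) = y ::ₘ (toMS c + toMS d) by
                    simp [toMS, Multiset.singleton_add]]
                  exact Multiset.erase_cons_head y _
                rw [show (((pool.erase x).erase y ++ [x + y * 2] : List Int) : Multiset Int)
                      = (((pool.erase x).erase y : List Int) : Multiset Int) + {x + y * 2} by
                    rfl, h5]
                simp only [toMS]
                abel
        · simp only [if_neg hK, if_pos (by omega : K ≤ x)]

theorem build_heap (xs : List Int) (h : PHeap) (hh : IsHeap h) :
    IsHeap (xs.foldl (fun h x => PHeap.heappush h x) h) ∧
      toMS (xs.foldl (fun h x => PHeap.heappush h x) h) = toMS h + (xs : Multiset Int) := by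
  induction xs generalizing h with
  | nil => simp [hh]
  | cons x t ih =>
    have hpush : IsHeap (PHeap.heappush h x) :=
      isHeap_merge _ _ (by simp [IsHeap, toMS]) hh
    obtain ⟨h1, h2⟩ := ih (PHeap.heappush h x) hpush
    refine ⟨by simpa using h1, ?_⟩
    simp only [List.foldl_cons] at h2 ⊢
    rw [h2, PHeap.heappush, toMS_merge]
    simp only [toMS, ← Multiset.cons_coe, ← Multiset.singleton_add]
    abel

-- ===== VERDICT (by name: the statement is the Claim_ definition above) =====
theorem solution_spec : Claim_equal_solution := by
  intro scoville K _ _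
  unfold Spec_solution solution solution_alt
  obtain ⟨hH, hM⟩ := build_heap scoville PHeap.nil trivial
  apply loop_eq
  · exact Nat.le_refl _
  · -- fuel for B: pool length equals heap size
    have := congrArg Multiset.card hM
    simp only [toMS, zero_add, card_toMS, Multiset.coe_card] at this
    omega
  · exact hH
  · rw [hM]
    simp [toMS]
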